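-- pv_equiv track=rewrite | github.com/brucehoff/turdle | turdle.py | get_hint_as_string
-- ===== SOURCE A (Python) =====
-- def char_count(target_string, character):
-- 	return sum(map(lambda x : 1 if character in x else 0, target_string))
--
-- def get_hint_as_string(guess, target):
-- 	#TODO raise exception if guess and target are not 5 letters
-- 	result = ['-','-','-','-','-']
-- 	unique_chars_in_guess = set([char for char in guess])
-- 	for guess_char in unique_chars_in_guess:
-- 		exact_match_ctr = 0
-- 		for i in range(0, len(guess)):
-- 			if guess[i]==guess_char and target[i]==guess_char:
-- 				result[i]='g'
-- 				exact_match_ctr = exact_match_ctr + 1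
-- 		# count the number of time guess_char is in **target** and subtract 'exact_match_ctr'
-- 		remaining_char_count = char_count(target, guess_char) - exact_match_ctr
-- 		# go through and tag as 'y' up to remaining_char_count instances of guess_char
-- 		# where they don't exactly match target
-- 		imperfect_match_ctr = 0
-- 		for i in range(0, len(guess)):
-- 			if imperfect_match_ctr >= remaining_char_count:
-- 				break
-- 			if guess[i]==guess_char and target[i]!=guess_char:
-- 				# so 'guess_char' is at pos'n i in guess, it's not an exact
-- 				# match, but since we did not 'break' (above), there is *some*
-- 				# unlabeled place in target where 'guess_char' occurs
--
-- 				result[i]='y'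
-- 				imperfect_match_ctr = imperfect_match_ctr + 1
--
-- 	return "".join(result)
-- ===== SOURCE B (Python) =====
-- def get_hint_as_string(guess, target):
-- 	# Stateless per-position rule: each cell is computed by a closed-form count,
-- 	# no mutable match counters and no per-unique-letter passes.
-- 	n = len(guess)
-- 	result = ['-'] * 5
-- 	for i in range(n):
-- 		c = guess[i]
-- 		if target[i] == c:
-- 			result[i] = 'g'
-- 		else:
-- 			spare = target.count(c) - sum(1 for j in range(n) if guess[j] == c and target[j] == c)
-- 			earlier = sum(1 for j in range(i) if guess[j] == c and target[j] != c)
-- 			if earlier < spare: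
-- 				result[i] = 'y'
-- 	return "".join(result)
-- ===== Notes on version B (the rewrite author's own statement) =====
-- stated objective: alternative
-- what changed: A iterates over the set of unique guess letters, mutating the result with two scans and two match counters per letter; B computes each cell independently by a stateless closed-form rule (green if exact, yellow if the count of earlier non-exact occurrences of the letter in the guess is below the letter's unmatched count in the target).
-- outside the precondition, e.g. on get_hint_as_string('abcdef', 'ghijkl'): A returns '-----', B returns '-----'; on get_hint_as_string('abc', 'ab'): A raises IndexError, B raises IndexError
import Mathlib
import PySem

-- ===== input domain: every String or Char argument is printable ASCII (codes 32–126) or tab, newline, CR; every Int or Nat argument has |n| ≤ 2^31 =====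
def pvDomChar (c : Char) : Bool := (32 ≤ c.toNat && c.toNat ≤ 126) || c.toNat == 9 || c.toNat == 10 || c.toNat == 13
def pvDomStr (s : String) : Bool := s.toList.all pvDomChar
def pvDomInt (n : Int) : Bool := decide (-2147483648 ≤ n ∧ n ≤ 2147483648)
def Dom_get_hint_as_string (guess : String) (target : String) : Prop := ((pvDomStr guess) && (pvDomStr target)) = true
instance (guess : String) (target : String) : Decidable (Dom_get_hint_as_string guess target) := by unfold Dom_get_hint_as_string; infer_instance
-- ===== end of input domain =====

-- B replaces A's per-unique-letter mutable counter passes by a stateless closed-form rule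
-- computed independently for each position (alternative decomposition, same cost).

-- ===== PORT A =====
-- char_count(target_string, character): 'character in x' over one-char strings x is equality
def pvCharCount (t : List Char) (c : Char) : Int :=
  (t.map (fun x => if c = x then (1 : Int) else 0)).sum

-- body of A's first inner loop (state: (result, exact_match_ctr))
def pvPhase1 (g t : List Char) (c : Char) (st : List Char × Int) (i : Int) : List Char × Int :=
  if PySem.List.pyGetD g i '-' = c ∧ PySem.List.pyGetD t i '-' = c then
    (PySem.List.pySetD st.1 i 'g', st.2 + 1)
  else st

-- A's second inner loop, with the 'break' as an early return (state: imperfect_match_ctr, result)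
def pvPhase2 (g t : List Char) (c : Char) (rem : Int) : List Int → Int → List Char → List Char
  | [], _, r => r
  | i :: is, m, r =>
    if rem ≤ m then r
    else if PySem.List.pyGetD g i '-' = c ∧ ¬ PySem.List.pyGetD t i '-' = c then
      pvPhase2 g t c rem is (m + 1) (PySem.List.pySetD r i 'y')
    else pvPhase2 g t c rem is m r

-- one iteration of A's outer loop over the unique guess characters
def pvProcChar (g t : List Char) (r : List Char) (c : Char) : List Char :=
  let st := (PySem.List.pyRange 0 (g.length : Int) 1).foldl (pvPhase1 g t c) (r, 0)
  pvPhase2 g t c (pvCharCount t c - st.2) (PySem.List.pyRange 0 (g.length : Int) 1) 0 st.1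

def get_hint_as_string (guess : String) (target : String) : String :=
  let g := guess.toList
  let t := target.toList
  String.ofList ((PySem.Set.ofList g).foldl (pvProcChar g t) ['-', '-', '-', '-', '-'])

-- ===== PORT B =====
-- one iteration of B's single loop: decide cell i by a closed-form count
def pvRuleB (g t : List Char) (r : List Char) (i : Int) : List Char :=
  let c := PySem.List.pyGetD g i '-'
  if PySem.List.pyGetD t i '-' = c then PySem.List.pySetD r i 'g'
  else
    let spare : Int := (PySem.List.count t c : Int) -
      ((PySem.List.pyRange 0 (g.length : Int) 1).map
        (fun j => if PySem.List.pyGetD g j '-' = c ∧ PySem.List.pyGetD t j '-' = c then (1 : Int) else 0)).sum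
    let earlier : Int :=
      ((PySem.List.pyRange 0 i 1).map
        (fun j => if PySem.List.pyGetD g j '-' = c ∧ ¬ PySem.List.pyGetD t j '-' = c then (1 : Int) else 0)).sum
    if earlier < spare then PySem.List.pySetD r i 'y' else r

def get_hint_as_string_alt (guess : String) (target : String) : String :=
  let g := guess.toList
  let t := target.toList
  String.ofList ((PySem.List.pyRange 0 (g.length : Int) 1).foldl (pvRuleB g t) ['-', '-', '-', '-', '-'])

-- ===== PRECONDITION & SPEC =====
-- Pre_ excludes the inputs where A's indexing raises IndexError: guesses longer than the
-- target (target[i] out of range), and guesses longer than 5 — A's result buffer has five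
-- cells, so a mark past position 4 raises; on the excluded guesses > 5 where no such mark
-- happens A still returns (see claim cites), a quirk of the fixed-size buffer.
def Pre_get_hint_as_string (guess : String) (target : String) : Prop :=
  guess.toList.length ≤ target.toList.length ∧ guess.toList.length ≤ 5
instance (guess : String) (target : String) : Decidable (Pre_get_hint_as_string guess target) := by
  unfold Pre_get_hint_as_string; infer_instance

def pvWitness_get_hint_as_string : String × String := ("crane", "crate")

def Spec_get_hint_as_string (guess : String) (target : String) (out : String) : Prop :=
  out = get_hint_as_string_alt guess target
instance (guess : String) (target : String) (out : String) : Decidable (Spec_get_hint_as_string guess target out) := by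
  unfold Spec_get_hint_as_string; infer_instance

-- ===== CLAIM (what is proved, stated in full; the proofs are below) =====
def Claim_equal_get_hint_as_string : Prop := ∀ (guess : String) (target : String), Dom_get_hint_as_string guess target → Pre_get_hint_as_string guess target → Spec_get_hint_as_string guess target (get_hint_as_string guess target)

-- ===== LEMMAS AND PROOFS =====

-- the common closed-form description of one result cell
def pvExactCt (g t : List Char) (c : Char) : Nat :=
  (List.range g.length).countP (fun j => decide (g.getD j '-' = c ∧ t.getD j '-' = c))

def pvSpare (g t : List Char) (c : Char) : Int :=
  (List.count c t : Int) - (pvExactCt g t c : Int)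

def pvRank (g t : List Char) (c : Char) (i : Nat) : Nat :=
  (List.range i).countP (fun j => decide (g.getD j '-' = c ∧ ¬ t.getD j '-' = c))

def pvRule (g t : List Char) (i : Nat) : Char :=
  if t.getD i '-' = g.getD i '-' then 'g'
  else if (pvRank g t (g.getD i '-') i : Int) < pvSpare g t (g.getD i '-') then 'y' else '-'

def pvMS (g t : List Char) (S : List Char) : List Char :=
  (List.range 5).map (fun i => if i < g.length ∧ g.getD i '-' ∈ S then pvRule g t i else '-')

lemma pv_list_eq_map_getD (r : List Char) (h : r.length = 5) :
    (List.range 5).map (fun i => r.getD i '-') = r := by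
  apply List.ext_getElem
  · simp [h]
  · intro i h1 h2
    simp only [List.getElem_map, List.getElem_range]
    rw [List.getD_eq_getElem r '-' h2]

lemma pv_charCount_eq (t : List Char) (c : Char) : pvCharCount t c = (List.count c t : Int) := by
  induction t with
  | nil => rfl
  | cons x xs ih =>
    simp only [pvCharCount, List.map_cons, List.sum_cons, List.count_cons] at *
    rw [ih]
    by_cases hx : c = x
    · simp [hx]; ring
    · simp [hx, Ne.symm hx]

lemma pv_phase1_spec (g t : List Char) (c : Char) (h5 : g.length ≤ 5) :
    ∀ (l k : Nat) (r : List Char) (ctr : Int), k + l = g.length → r.length = 5 →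
    (List.map Int.ofNat (List.range' k l)).foldl (pvPhase1 g t c) (r, ctr) =
      ((List.range 5).map (fun i =>
          if k ≤ i ∧ i < g.length ∧ g.getD i '-' = c ∧ t.getD i '-' = c then 'g' else r.getD i '-'),
       ctr + ((List.range' k l).countP (fun j => decide (g.getD j '-' = c ∧ t.getD j '-' = c)) : Int)) := by
  intro l
  induction l with
  | zero =>
    intro k r ctr hk hr
    simp only [List.range'_zero, List.map_nil, List.foldl_nil, List.countP_nil,
      Nat.cast_zero, add_zero, Prod.mk.injEq]
    refine ⟨?_, trivial⟩
    conv_lhs => rw [← pv_list_eq_map_getD r hr]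
    apply List.map_congr_left
    intro i _
    rw [if_neg (by rintro ⟨h1, h2, -⟩; omega)]
  | succ l ih =>
    intro k r ctr hk hr
    have hkn : k < g.length := by omega
    rw [List.range'_succ]
    simp only [List.map_cons, List.foldl_cons, List.countP_cons]
    by_cases hcond : g.getD k '-' = c ∧ t.getD k '-' = c
    · rw [show pvPhase1 g t c (r, ctr) (Int.ofNat k) = (r.set k 'g', ctr + 1) from by
        simp only [pvPhase1, Int.ofNat_eq_natCast, PySem.List.pyGetD_natCast,
          PySem.List.pySetD_natCast]
        rw [if_pos hcond]]
      rw [ih (k + 1) (r.set k 'g') (ctr + 1) (by omega) (by simp [hr])]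
      simp only [Prod.mk.injEq]
      constructor
      · apply List.map_congr_left
        intro i _
        by_cases hik : i = k
        · subst hik
          have hk5 : i < r.length := by omega
          rw [if_neg (by rintro ⟨h1, -⟩; omega), if_pos ⟨le_refl i, hkn, hcond⟩]
          simp [List.getD_eq_getElem?_getD, hk5]
        · have hset : (r.set k 'g').getD i '-' = r.getD i '-' := by
            simp [List.getD_eq_getElem?_getD, Ne.symm hik]
          rw [hset]
          apply if_congr _ rfl rfl
          constructor
          · rintro ⟨h1, h2⟩; exact ⟨by omega, h2⟩
          · rintro ⟨h1, h2⟩; exact ⟨by omega, h2⟩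
      · rw [if_pos (by simp only [decide_eq_true_eq]; exact hcond)]
        push_cast
        ring
    · rw [show pvPhase1 g t c (r, ctr) (Int.ofNat k) = (r, ctr) from by
        simp only [pvPhase1, Int.ofNat_eq_natCast, PySem.List.pyGetD_natCast]
        rw [if_neg hcond]]
      rw [ih (k + 1) r ctr (by omega) hr]
      simp only [Prod.mk.injEq]
      constructor
      · apply List.map_congr_left
        intro i _
        by_cases hik : i = k
        · subst hik
          rw [if_neg (by rintro ⟨h1, -⟩; omega),
            if_neg (by rintro ⟨-, -, h3, h4⟩; exact hcond ⟨h3, h4⟩)]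
        · apply if_congr _ rfl rfl
          constructor
          · rintro ⟨h1, h2⟩; exact ⟨by omega, h2⟩
          · rintro ⟨h1, h2⟩; exact ⟨by omega, h2⟩
      · rw [if_neg (by simp only [decide_eq_true_eq]; exact hcond)]
        simp

lemma pv_phase2_spec (g t : List Char) (c : Char) (rem : Int) (h5 : g.length ≤ 5) :
    ∀ (l k : Nat) (m : Int) (r : List Char), k + l = g.length → r.length = 5 →
    pvPhase2 g t c rem (List.map Int.ofNat (List.range' k l)) m r =
      (List.range 5).map (fun i =>
        if k ≤ i ∧ i < g.length ∧ g.getD i '-' = c ∧ ¬ t.getD i '-' = c ∧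
            m + ((List.range' k (i - k)).countP (fun j => decide (g.getD j '-' = c ∧ ¬ t.getD j '-' = c)) : Int) < rem
        then 'y' else r.getD i '-') := by
  intro l
  induction l with
  | zero =>
    intro k m r hk hr
    simp only [List.range'_zero, List.map_nil, pvPhase2]
    conv_lhs => rw [← pv_list_eq_map_getD r hr]
    apply List.map_congr_left
    intro i _
    rw [if_neg (by rintro ⟨h1, h2, -⟩; omega)]
  | succ l ih =>
    intro k m r hk hr
    have hkn : k < g.length := by omega
    rw [List.range'_succ]
    simp only [List.map_cons]
    rw [pvPhase2]
    simp only [Int.ofNat_eq_natCast, PySem.List.pyGetD_natCast, PySem.List.pySetD_natCast]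
    by_cases hbreak : rem ≤ m
    · rw [if_pos hbreak]
      conv_lhs => rw [← pv_list_eq_map_getD r hr]
      apply List.map_congr_left
      intro i _
      rw [if_neg (by rintro ⟨-, -, -, -, h5⟩; omega)]
    · rw [if_neg hbreak]
      by_cases hcond : g.getD k '-' = c ∧ ¬ t.getD k '-' = c
      · rw [if_pos hcond]
        rw [ih (k + 1) (m + 1) (r.set k 'y') (by omega) (by simp [hr])]
        apply List.map_congr_left
        intro i _
        by_cases hik : i = k
        · subst hik
          have hk5 : i < r.length := by omega
          rw [if_neg (by rintro ⟨h1, -⟩; omega),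
            if_pos ⟨le_refl i, hkn, hcond.1, hcond.2, by
              simp only [Nat.sub_self, List.range'_zero, List.countP_nil, Nat.cast_zero,
                add_zero]
              omega⟩]
          simp [List.getD_eq_getElem?_getD, hk5]
        · have hset : (r.set k 'y').getD i '-' = r.getD i '-' := by
            simp [List.getD_eq_getElem?_getD, Ne.symm hik]
          rw [hset]
          apply if_congr _ rfl rfl
          constructor
          · rintro ⟨h1, h2, h3, h4, h5⟩
            refine ⟨by omega, h2, h3, h4, ?_⟩
            rw [show i - k = (i - (k + 1)) + 1 by omega, List.range'_succ, List.countP_cons,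
              if_pos (by simp only [decide_eq_true_eq]; exact hcond)]
            push_cast
            omega
          · rintro ⟨h1, h2, h3, h4, h5⟩
            rw [show i - k = (i - (k + 1)) + 1 by omega, List.range'_succ, List.countP_cons,
              if_pos (by simp only [decide_eq_true_eq]; exact hcond)] at h5
            refine ⟨by omega, h2, h3, h4, ?_⟩
            push_cast at h5 ⊢
            omega
      · rw [if_neg hcond]
        rw [ih (k + 1) m r (by omega) hr]
        apply List.map_congr_left
        intro i _
        by_cases hik : i = k
        · subst hik
          rw [if_neg (by rintro ⟨h1, -⟩; omega),
            if_neg (by rintro ⟨-, -, h3, h4, -⟩; exact hcond ⟨h3, h4⟩)]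
        · apply if_congr _ rfl rfl
          constructor
          · rintro ⟨h1, h2, h3, h4, h5⟩
            refine ⟨by omega, h2, h3, h4, ?_⟩
            rw [show i - k = (i - (k + 1)) + 1 by omega, List.range'_succ, List.countP_cons,
              if_neg (by simp only [decide_eq_true_eq]; exact hcond)]
            omega
          · rintro ⟨h1, h2, h3, h4, h5⟩
            rw [show i - k = (i - (k + 1)) + 1 by omega, List.range'_succ, List.countP_cons,
              if_neg (by simp only [decide_eq_true_eq]; exact hcond)] at h5
            exact ⟨by omega, h2, h3, h4, by omega⟩

lemma pv_range_cast (n : Nat) :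
    PySem.List.pyRange 0 (n : Int) 1 = List.map Int.ofNat (List.range' 0 n) := by
  rw [PySem.List.pyRange_zero_nat, ← List.range_eq_range']
  simp

lemma pv_procChar_spec (g t : List Char) (h5 : g.length ≤ 5) (S : List Char) (c : Char) (hc : c ∉ S) :
    pvProcChar g t (pvMS g t S) c = pvMS g t (c :: S) := by
  have hlen : (pvMS g t S).length = 5 := by simp [pvMS]
  unfold pvProcChar
  rw [pv_range_cast g.length,
    pv_phase1_spec g t c h5 g.length 0 (pvMS g t S) 0 (by omega) hlen]
  simp only
  rw [pv_phase2_spec g t c _ h5 g.length 0 0 _ (by omega) (by simp)]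
  have hrem : pvCharCount t c -
      (0 + (((List.range' 0 g.length).countP
        (fun j => decide (g.getD j '-' = c ∧ t.getD j '-' = c)) : Nat) : Int)) = pvSpare g t c := by
    rw [pv_charCount_eq, ← List.range_eq_range']
    unfold pvSpare pvExactCt
    ring
  unfold pvMS
  apply List.map_congr_left
  intro i hi
  simp only [List.mem_range] at hi
  rw [PySem.List.getD_map_range _ _ _ _ hi, PySem.List.getD_map_range _ _ _ _ hi]
  have hcnt : (0 : Int) +
      (((List.range' 0 (i - 0)).countP
        (fun j => decide (g.getD j '-' = c ∧ ¬ t.getD j '-' = c)) : Nat) : Int) =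
      (pvRank g t c i : Int) := by
    unfold pvRank
    rw [Nat.sub_zero, ← List.range_eq_range']
    ring
  rw [hcnt, hrem]
  unfold pvRule
  by_cases hgc : g.getD i '-' = c
  · subst hgc
    simp only [Nat.zero_le, true_and, List.mem_cons_self, and_true]
    split_ifs <;> first | rfl | tauto
  · simp only [List.getD_eq_getElem?_getD] at hgc
    simp [hgc, List.mem_cons]

lemma pv_MS_congr (g t : List Char) (S S' : List Char) (h : ∀ x, x ∈ S ↔ x ∈ S') :
    pvMS g t S = pvMS g t S' := by
  unfold pvMS
  apply List.map_congr_left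
  intro i _
  simp [h]

lemma pv_fold_proc (g t : List Char) (h5 : g.length ≤ 5) :
    ∀ (cs S : List Char), cs.Nodup → (∀ x ∈ cs, x ∉ S) →
    cs.foldl (pvProcChar g t) (pvMS g t S) = pvMS g t (S ++ cs) := by
  intro cs
  induction cs with
  | nil =>
    intro S _ _
    simp only [List.foldl_nil, List.append_nil]
  | cons c cs ih =>
    intro S hnd hdisj
    obtain ⟨hcc, hnd'⟩ := List.nodup_cons.mp hnd
    simp only [List.foldl_cons]
    rw [pv_procChar_spec g t h5 S c (hdisj c List.mem_cons_self),
      ih (c :: S) hnd' (fun x hx => by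
        simp only [List.mem_cons, not_or]
        exact ⟨fun he => hcc (he ▸ hx), hdisj x (List.mem_cons_of_mem c hx)⟩)]
    apply pv_MS_congr
    intro x
    simp only [List.mem_cons, List.mem_append]
    tauto

lemma pv_MS_nil (g t : List Char) : pvMS g t [] = ['-', '-', '-', '-', '-'] := by
  simp [pvMS, List.range_succ]

lemma pv_A_char (g t : List Char) (h5 : g.length ≤ 5) :
    (PySem.Set.ofList g).foldl (pvProcChar g t) ['-', '-', '-', '-', '-'] =
      (List.range 5).map (fun i => if i < g.length then pvRule g t i else '-') := by
  rw [← pv_MS_nil g t, pv_fold_proc g t h5 (PySem.Set.ofList g) [] (PySem.Set.nodup_ofList g)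
    (fun x _ hx => (List.not_mem_nil) hx)]
  unfold pvMS
  apply List.map_congr_left
  intro i _
  apply if_congr _ rfl rfl
  constructor
  · rintro ⟨h1, -⟩; exact h1
  · intro h1
    refine ⟨h1, ?_⟩
    simp only [List.nil_append]
    rw [PySem.Set.mem_ofList, List.getD_eq_getElem g '-' h1]
    exact List.getElem_mem h1

lemma pv_sum_ite (xs : List Nat) (P : Nat → Prop) [inst : DecidablePred P] :
    (xs.map (fun j => if P j then (1 : Int) else 0)).sum =
      ((xs.countP (fun j => decide (P j)) : Nat) : Int) := by
  have := PySem.List.sum_map_ite_one_zero (fun j => decide (P j)) xs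
  simpa using this

lemma pv_B_step (g t : List Char) (k : Nat) (r : List Char) :
    pvRuleB g t r (k : Int) =
      if t.getD k '-' = g.getD k '-' then r.set k 'g'
      else if (pvRank g t (g.getD k '-') k : Int) < pvSpare g t (g.getD k '-') then r.set k 'y'
      else r := by
  simp only [pvRuleB, PySem.List.pyGetD_natCast, PySem.List.pySetD_natCast,
    PySem.List.count_eq, pv_range_cast]
  by_cases htc : t.getD k '-' = g.getD k '-'
  · rw [if_pos htc, if_pos htc]
  · rw [if_neg htc, if_neg htc]
    have hall : ((List.map Int.ofNat (List.range' 0 g.length)).map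
        (fun j => if PySem.List.pyGetD g j '-' = g.getD k '-' ∧
            PySem.List.pyGetD t j '-' = g.getD k '-' then (1 : Int) else 0)).sum
        = ((pvExactCt g t (g.getD k '-') : Nat) : Int) := by
      rw [List.map_map, ← List.range_eq_range']
      unfold pvExactCt
      rw [← pv_sum_ite]
      apply congrArg List.sum
      apply List.map_congr_left
      intro j _
      simp [PySem.List.pyGetD_natCast]
    have hear : ((List.map Int.ofNat (List.range' 0 k)).map
        (fun j => if PySem.List.pyGetD g j '-' = g.getD k '-' ∧
            ¬ PySem.List.pyGetD t j '-' = g.getD k '-' then (1 : Int) else 0)).sum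
        = ((pvRank g t (g.getD k '-') k : Nat) : Int) := by
      rw [List.map_map, ← List.range_eq_range']
      unfold pvRank
      rw [← pv_sum_ite]
      apply congrArg List.sum
      apply List.map_congr_left
      intro j _
      simp [PySem.List.pyGetD_natCast]
    rw [hall, hear]
    rfl

lemma pv_B_spec (g t : List Char) (h5 : g.length ≤ 5) :
    ∀ (l k : Nat) (r : List Char), k + l = g.length → r.length = 5 →
    (List.map Int.ofNat (List.range' k l)).foldl (pvRuleB g t) r =
      (List.range 5).map (fun i =>
        if k ≤ i ∧ i < g.length ∧ ¬ pvRule g t i = '-' then pvRule g t i else r.getD i '-') := by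
  intro l
  induction l with
  | zero =>
    intro k r hk hr
    simp only [List.range'_zero, List.map_nil, List.foldl_nil]
    conv_lhs => rw [← pv_list_eq_map_getD r hr]
    apply List.map_congr_left
    intro i _
    rw [if_neg (by rintro ⟨h1, h2, -⟩; omega)]
  | succ l ih =>
    intro k r hk hr
    have hkn : k < g.length := by omega
    have hk5 : k < r.length := by omega
    rw [List.range'_succ]
    simp only [List.map_cons, List.foldl_cons]
    rw [show Int.ofNat k = ((k : Nat) : Int) from rfl, pv_B_step g t k r]
    by_cases htc : t.getD k '-' = g.getD k '-'
    · rw [if_pos htc, ih (k + 1) (r.set k 'g') (by omega) (by simp [hr])]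
      apply List.map_congr_left
      intro i _
      by_cases hik : i = k
      · subst hik
        rw [if_neg (by rintro ⟨h1, -⟩; omega),
          if_pos ⟨le_refl i, hkn, by unfold pvRule; rw [if_pos htc]; decide⟩]
        unfold pvRule
        rw [if_pos htc]
        simp [List.getD_eq_getElem?_getD, hk5]
      · have hset : (r.set k 'g').getD i '-' = r.getD i '-' := by
          simp [List.getD_eq_getElem?_getD, Ne.symm hik]
        rw [hset]
        apply if_congr _ rfl rfl
        constructor
        · rintro ⟨h1, h2⟩; exact ⟨by omega, h2⟩
        · rintro ⟨h1, h2⟩; exact ⟨by omega, h2⟩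
    · rw [if_neg htc]
      by_cases hyc : (pvRank g t (g.getD k '-') k : Int) < pvSpare g t (g.getD k '-')
      · rw [if_pos hyc, ih (k + 1) (r.set k 'y') (by omega) (by simp [hr])]
        apply List.map_congr_left
        intro i _
        by_cases hik : i = k
        · subst hik
          rw [if_neg (by rintro ⟨h1, -⟩; omega),
            if_pos ⟨le_refl i, hkn, by unfold pvRule; rw [if_neg htc, if_pos hyc]; decide⟩]
          unfold pvRule
          rw [if_neg htc, if_pos hyc]
          simp [List.getD_eq_getElem?_getD, hk5]
        · have hset : (r.set k 'y').getD i '-' = r.getD i '-' := by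
            simp [List.getD_eq_getElem?_getD, Ne.symm hik]
          rw [hset]
          apply if_congr _ rfl rfl
          constructor
          · rintro ⟨h1, h2⟩; exact ⟨by omega, h2⟩
          · rintro ⟨h1, h2⟩; exact ⟨by omega, h2⟩
      · rw [if_neg hyc, ih (k + 1) r (by omega) hr]
        apply List.map_congr_left
        intro i _
        by_cases hik : i = k
        · subst hik
          rw [if_neg (by rintro ⟨h1, -⟩; omega),
            if_neg (by
              rintro ⟨-, -, h3⟩
              exact h3 (by unfold pvRule; rw [if_neg htc, if_neg hyc]))]
        · apply if_congr _ rfl rfl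
          constructor
          · rintro ⟨h1, h2⟩; exact ⟨by omega, h2⟩
          · rintro ⟨h1, h2⟩; exact ⟨by omega, h2⟩

lemma pv_B_char (g t : List Char) (h5 : g.length ≤ 5) :
    (PySem.List.pyRange 0 (g.length : Int) 1).foldl (pvRuleB g t) ['-', '-', '-', '-', '-'] =
      (List.range 5).map (fun i => if i < g.length then pvRule g t i else '-') := by
  rw [pv_range_cast, ← List.range_eq_range', List.range_eq_range',
    pv_B_spec g t h5 g.length 0 ['-', '-', '-', '-', '-'] (by omega) rfl]
  apply List.map_congr_left
  intro i hi
  simp only [List.mem_range] at hi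
  have hd : (['-', '-', '-', '-', '-'] : List Char).getD i '-' = '-' := by
    interval_cases i <;> rfl
  rw [hd]
  by_cases hin : i < g.length
  · by_cases hrule : pvRule g t i = '-'
    · rw [if_neg (by rintro ⟨-, -, h3⟩; exact h3 hrule), if_pos hin, hrule]
    · rw [if_pos ⟨Nat.zero_le i, hin, hrule⟩, if_pos hin]
  · rw [if_neg (by rintro ⟨-, h2, -⟩; exact hin h2), if_neg hin]

-- ===== VERDICT (by name: the statement is the Claim_ definition above) =====
theorem get_hint_as_string_spec : Claim_equal_get_hint_as_string := by
  intro guess target _ hpre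
  show get_hint_as_string guess target = get_hint_as_string_alt guess target
  simp only [get_hint_as_string, get_hint_as_string_alt]
  rw [pv_A_char guess.toList target.toList hpre.2]
  rw [pv_B_char guess.toList target.toList hpre.2]
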